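-- pv_equiv track=rewrite | github.com/LuisJRubioH/LevelUp-ELO | src/infrastructure/external_api/ai_client.py | select_best_math_model
-- ===== SOURCE A (Python) =====
-- _MATH_REASONING_PREFERENCE = [
--     "deepseek-r1",
--     "qwen2.5-math",
--     "qwen2.5",
--     "llama3",
--     "mistral",
-- ]
--
-- def select_best_math_model(available_models: list, provider: str = None) -> str | None:
--     """Selecciona el mejor modelo local para razonamiento matemático.
--
--     Recorre la lista de preferencia y retorna el primer modelo disponible que
--     coincida (por substring). Retorna None si ningún modelo preferido está disponible.
--     Solo aplica para proveedores locales (Ollama, LM Studio).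
--     """
--     if provider not in ('ollama', 'lmstudio', None):
--         return None
--     for preferred in _MATH_REASONING_PREFERENCE:
--         for model in available_models:
--             if preferred in model.lower():
--                 return model
--     return None
-- ===== SOURCE B (Python) =====
-- _MATH_REASONING_PREFERENCE = [
--     "deepseek-r1",
--     "qwen2.5-math",
--     "qwen2.5",
--     "llama3",
--     "mistral",
-- ]
--
--
-- def _rank(model):
--     """Smallest preference index whose string occurs in model.lower(), else None."""
--     low = model.lower()
--     i = 0
--     for preferred in _MATH_REASONING_PREFERENCE:
--         if preferred in low:
--             return i
--         i += 1
--     return None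
--
--
-- def select_best_math_model(available_models: list, provider: str = None) -> str | None:
--     if provider not in ('ollama', 'lmstudio', None):
--         return None
--     best_rank = None
--     best_model = None
--     for model in available_models:
--         r = _rank(model)
--         if r is not None and (best_rank is None or r < best_rank):
--             best_rank, best_model = r, model
--     return best_model
-- ===== Notes on version B (the rewrite author's own statement) =====
-- stated objective: alternative
-- what changed: Replaced A's preference-outer/model-inner nested scan with a single pass over the models that computes each model's best preference rank and keeps the argmin (strict comparison preserves first-occurrence tie-breaking).
import Mathlib
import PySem

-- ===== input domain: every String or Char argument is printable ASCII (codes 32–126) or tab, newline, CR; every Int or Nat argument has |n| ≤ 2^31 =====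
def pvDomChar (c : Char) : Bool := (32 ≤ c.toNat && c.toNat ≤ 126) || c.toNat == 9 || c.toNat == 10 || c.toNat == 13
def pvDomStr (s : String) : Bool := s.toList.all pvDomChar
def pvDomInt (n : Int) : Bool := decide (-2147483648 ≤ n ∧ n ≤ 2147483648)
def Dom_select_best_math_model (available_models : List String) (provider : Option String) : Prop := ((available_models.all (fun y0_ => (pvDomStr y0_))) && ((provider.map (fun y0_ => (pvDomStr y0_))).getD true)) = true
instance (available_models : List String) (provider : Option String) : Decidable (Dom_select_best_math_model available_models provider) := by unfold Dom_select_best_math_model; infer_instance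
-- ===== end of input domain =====

-- B replaces A's preference-outer/model-inner nested scan by a single pass over the
-- models keeping the argmin of each model's best preference rank (objective: alternative).

def pvPrefs : List String :=
  ["deepseek-r1", "qwen2.5-math", "qwen2.5", "llama3", "mistral"]

-- provider not in ('ollama', 'lmstudio', None)
def pvProviderOk (provider : Option String) : Bool :=
  provider == some "ollama" || provider == some "lmstudio" || provider == none

-- ===== PORT A =====
-- outer loop over preferences; inner loop over models with early return (= find?)
def pvLoopA : List String → List String → Option String
  | [], _ => none
  | p :: ps, ms =>
    match ms.find? (fun m => PySem.Str.isIn p (PySem.Str.lower m)) with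
    | some m => some m
    | none => pvLoopA ps ms

def select_best_math_model (available_models : List String) (provider : Option String) : Option String :=
  if pvProviderOk provider then pvLoopA pvPrefs available_models else none

-- ===== PORT B =====
-- _rank: index of the first preference contained in low, counting with i
def pvRank : List String → String → Int → Option Int
  | [], _, _ => none
  | p :: ps, low, i => if PySem.Str.isIn p low then some i else pvRank ps low (i + 1)

-- the single pass keeping (best_rank, best_model); replace only on strictly smaller rank
def pvPick : List String → List String → Option (Int × String) → Option String
  | _, [], best => best.map Prod.snd
  | ps, m :: ms, best =>
    let r := pvRank ps (PySem.Str.lower m) 0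
    let best' :=
      match r, best with
      | none, b => b
      | some r, none => some (r, m)
      | some r, some b => if r < b.1 then some (r, m) else some b
    pvPick ps ms best'

def select_best_math_model_alt (available_models : List String) (provider : Option String) : Option String :=
  if pvProviderOk provider then pvPick pvPrefs available_models none else none

-- ===== PRECONDITION & SPEC =====
def Spec_select_best_math_model (available_models : List String) (provider : Option String) (out : Option String) : Prop := out = select_best_math_model_alt available_models provider
instance (available_models : List String) (provider : Option String) (out : Option String) : Decidable (Spec_select_best_math_model available_models provider out) := by unfold Spec_select_best_math_model; infer_instance

-- ===== CLAIM (what is proved, stated in full; the proofs are below) =====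
def Claim_equal_select_best_math_model : Prop := ∀ (available_models : List String) (provider : Option String), Dom_select_best_math_model available_models provider → Spec_select_best_math_model available_models provider (select_best_math_model available_models provider)

-- ===== LEMMAS AND PROOFS =====

theorem pvRank_shift (ps : List String) (low : String) (i : Int) :
    pvRank ps low i = (pvRank ps low 0).map (fun r => i + r) := by
  induction ps generalizing i with
  | nil => simp [pvRank]
  | cons p ps ih =>
    simp only [pvRank]
    by_cases h : PySem.Str.isIn p low = true
    · rw [if_pos h, if_pos h]; simp
    · rw [if_neg h, if_neg h, ih (i + 1), ih (0 + 1)]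
      cases pvRank ps low 0 <;> simp [add_assoc]

theorem pvRank_nonneg (ps : List String) (low : String) (i r : Int)
    (h : pvRank ps low i = some r) : i ≤ r := by
  induction ps generalizing i with
  | nil => simp [pvRank] at h
  | cons p ps ih =>
    simp only [pvRank] at h
    by_cases hp : PySem.Str.isIn p low = true
    · rw [if_pos hp] at h
      injection h with h'
      omega
    · rw [if_neg hp] at h
      have := ih (i + 1) h
      omega

theorem pvPick_nil (ms : List String) (best : Option (Int × String)) :
    pvPick [] ms best = best.map Prod.snd := by
  induction ms generalizing best with
  | nil => rfl
  | cons m ms ih => simpa [pvPick, pvRank] using ih best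

theorem pvPick_zero (ps ms : List String) (m0 : String) :
    pvPick ps ms (some (0, m0)) = some m0 := by
  induction ms with
  | nil => rfl
  | cons m ms ih =>
    simp only [pvPick]
    cases hr : pvRank ps (PySem.Str.lower m) 0 with
    | none => simpa using ih
    | some r =>
      have h0 : (0 : Int) ≤ r := pvRank_nonneg ps _ 0 r hr
      have hlt : ¬ r < 0 := by omega
      simpa [hlt] using ih

theorem pvPick_find (p : String) (ps : List String) (ms : List String) (m0 : String)
    (best : Option (Int × String))
    (hfind : ms.find? (fun m => PySem.Str.isIn p (PySem.Str.lower m)) = some m0)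
    (hbest : ∀ b, best = some b → 1 ≤ b.1) :
    pvPick (p :: ps) ms best = some m0 := by
  induction ms generalizing best with
  | nil => simp at hfind
  | cons m ms ih =>
    by_cases hm : PySem.Str.isIn p (PySem.Str.lower m) = true
    · rw [show List.find? (fun m => PySem.Str.isIn p (PySem.Str.lower m)) (m :: ms) = some m from
          List.find?_cons_of_pos hm, Option.some_inj] at hfind
      subst hfind
      simp only [pvPick, pvRank]
      rw [if_pos hm]
      cases best with
      | none => simpa using pvPick_zero (p :: ps) ms m
      | some b =>
        have hb : 1 ≤ b.1 := hbest b rfl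
        have hlt : (0 : Int) < b.1 := by omega
        simpa [hlt] using pvPick_zero (p :: ps) ms m
    · rw [show List.find? (fun m => PySem.Str.isIn p (PySem.Str.lower m)) (m :: ms) =
            List.find? (fun m => PySem.Str.isIn p (PySem.Str.lower m)) ms from
          List.find?_cons_of_neg hm] at hfind
      simp only [pvPick, pvRank]
      rw [if_neg hm]
      cases hr : pvRank ps (PySem.Str.lower m) (0 + 1) with
      | none => simpa using ih best hfind hbest
      | some r =>
        have h1 : (1 : Int) ≤ r := by
          have := pvRank_nonneg ps _ (0 + 1) r hr
          omega
        cases best with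
        | none =>
          simpa using ih (some (r, m)) hfind (by intro b hb; obtain rfl := Option.some_inj.mp hb; simpa using h1)
        | some b =>
          by_cases hlt : r < b.1
          · simpa [hlt] using ih (some (r, m)) hfind (by intro b hb; obtain rfl := Option.some_inj.mp hb; simpa using h1)
          · simpa [hlt] using ih (some b) hfind (by intro b' h; obtain rfl := Option.some_inj.mp h; exact hbest _ rfl)

theorem pvPick_shift (p : String) (ps : List String) (ms : List String)
    (best : Option (Int × String))
    (hno : ∀ m ∈ ms, ¬ PySem.Str.isIn p (PySem.Str.lower m) = true) :
    pvPick (p :: ps) ms (best.map (fun b => (1 + b.1, b.2))) = pvPick ps ms best := by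
  induction ms generalizing best with
  | nil => cases best <;> rfl
  | cons m ms ih =>
    have hm := hno m (List.mem_cons_self ..)
    have hno' : ∀ m' ∈ ms, ¬ PySem.Str.isIn p (PySem.Str.lower m') = true :=
      fun m' hm' => hno m' (List.mem_cons_of_mem _ hm')
    simp only [pvPick, pvRank]
    rw [if_neg hm, pvRank_shift ps (PySem.Str.lower m) (0 + 1)]
    cases hr : pvRank ps (PySem.Str.lower m) 0 with
    | none => simpa using ih best hno'
    | some r =>
      cases best with
      | none => simpa using ih (some (r, m)) hno'
      | some b =>
        by_cases hlt : r < b.1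
        · have h2 : 0 + 1 + r < 1 + b.1 := by omega
          simpa [hlt, h2] using ih (some (r, m)) hno'
        · have h2 : ¬ 0 + 1 + r < 1 + b.1 := by omega
          simpa [hlt, h2] using ih (some b) hno'

theorem pvLoopA_eq_pick (ps ms : List String) : pvLoopA ps ms = pvPick ps ms none := by
  induction ps generalizing ms with
  | nil => simp [pvLoopA, pvPick_nil]
  | cons p ps ih =>
    cases hfind : ms.find? (fun m => PySem.Str.isIn p (PySem.Str.lower m)) with
    | some m0 =>
      simp only [pvLoopA, hfind]
      exact (pvPick_find p ps ms m0 none hfind (by simp)).symm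
    | none =>
      have hno : ∀ m ∈ ms, ¬ PySem.Str.isIn p (PySem.Str.lower m) = true := by
        intro m hm
        exact by simpa using List.find?_eq_none.mp hfind m hm
      simp only [pvLoopA, hfind]
      rw [ih ms]
      exact (pvPick_shift p ps ms none hno).symm

-- ===== VERDICT (by name: the statement is the Claim_ definition above) =====
theorem select_best_math_model_spec : Claim_equal_select_best_math_model := by
  intro ms pv _
  unfold Spec_select_best_math_model select_best_math_model select_best_math_model_alt
  by_cases h : pvProviderOk pv = true <;> simp [h, pvLoopA_eq_pick]
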